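-- pv_equiv track=rewrite | github.com/Danielkweber/advent2024 | d08/solution.py | calc_antinodes_for_freq
-- ===== SOURCE A (Python) =====
-- from typing import Dict, List, Tuple
-- from operator import add, sub
--
-- def check_within_square(
--     val: Tuple[int, int], a: Tuple[int, int], b: Tuple[int, int]
-- ) -> bool:
--     if val[0] <= max(a[0], b[0]) and val[0] >= min(a[0], b[0]):
--         return val[1] <= max(a[1], b[1]) and val[1] >= min(a[1], b[1])
--     return False
--
-- def calc_antinodes_for_freq(nodes: List[Tuple[int, int]]):
--     antis_for_freq = []
--     for i in range(len(nodes)):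
--         primary = nodes[i]
--         for j in range(i + 1, len(nodes)):
--             potential_antis = []
--             secondary = nodes[j]
--             slope_y = secondary[1] - primary[1]
--             slope_x = secondary[0] - primary[0]
--             slope = (slope_x, slope_y)
--             potential_antis.append(tuple(map(add, primary, slope)))
--             potential_antis.append(tuple(map(sub, primary, slope)))
--             potential_antis.append(tuple(map(add, secondary, slope)))
--             potential_antis.append(tuple(map(sub, secondary, slope)))
--             for anti in potential_antis:
--                 if not check_within_square(anti, primary, secondary):
--                     antis_for_freq.append(anti)
--     return antis_for_freq
-- ===== SOURCE B (Python) =====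
-- from typing import List, Tuple
--
-- def calc_antinodes_for_freq(nodes: List[Tuple[int, int]]):
--     return [
--         anti
--         for i, (px, py) in enumerate(nodes)
--         for (sx, sy) in nodes[i + 1:]
--         if (px, py) != (sx, sy)
--         for anti in ((2 * px - sx, 2 * py - sy), (2 * sx - px, 2 * sy - py))
--     ]
-- ===== Notes on version B (the rewrite author's own statement) =====
-- stated objective: simpler
-- what changed: Replaced the four-candidate list plus bounding-box filter (check_within_square) with a closed form: for each unequal pair the two reflected points 2p-s and 2s-p are exactly the surviving antinodes, emitted directly in one comprehension over enumerate and a slice.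
import Mathlib
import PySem

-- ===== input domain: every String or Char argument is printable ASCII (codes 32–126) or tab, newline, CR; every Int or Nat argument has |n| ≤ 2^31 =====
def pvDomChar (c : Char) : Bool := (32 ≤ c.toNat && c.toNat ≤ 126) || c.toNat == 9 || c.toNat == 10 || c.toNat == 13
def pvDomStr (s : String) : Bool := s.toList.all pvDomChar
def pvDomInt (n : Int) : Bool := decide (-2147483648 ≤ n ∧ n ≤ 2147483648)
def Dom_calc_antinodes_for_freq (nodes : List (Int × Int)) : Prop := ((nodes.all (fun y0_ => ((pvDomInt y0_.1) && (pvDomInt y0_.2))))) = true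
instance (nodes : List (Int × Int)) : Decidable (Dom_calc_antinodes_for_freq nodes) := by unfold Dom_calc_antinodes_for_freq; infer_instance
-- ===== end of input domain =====

-- B drops A's four-candidate list and bounding-box filter: for each unequal pair the
-- two reflections 2p-s and 2s-p are emitted directly (simpler; same return values).

-- ===== PORT A =====
def check_within_square (val a b : Int × Int) : Bool :=
  if val.1 ≤ max a.1 b.1 ∧ val.1 ≥ min a.1 b.1 then
    decide (val.2 ≤ max a.2 b.2 ∧ val.2 ≥ min a.2 b.2)
  else false

def calc_antinodes_for_freq (nodes : List (Int × Int)) : List (Int × Int) :=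
  (PySem.List.pyRange 0 (nodes.length : Int) 1).foldl (fun acc i =>
    match PySem.List.pyGet? nodes i with
    | none => acc  -- unreachable: i is in range
    | some primary =>
      (PySem.List.pyRange (i + 1) (nodes.length : Int) 1).foldl (fun acc2 j =>
        match PySem.List.pyGet? nodes j with
        | none => acc2  -- unreachable: j is in range
        | some secondary =>
          let slope_x := secondary.1 - primary.1
          let slope_y := secondary.2 - primary.2
          let potential_antis : List (Int × Int) :=
            [(primary.1 + slope_x, primary.2 + slope_y),
             (primary.1 - slope_x, primary.2 - slope_y),
             (secondary.1 + slope_x, secondary.2 + slope_y),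
             (secondary.1 - slope_x, secondary.2 - slope_y)]
          potential_antis.foldl (fun a anti =>
            if check_within_square anti primary secondary then a else a ++ [anti]) acc2)
        acc)
    []

-- ===== PORT B =====
def calc_antinodes_for_freq_alt (nodes : List (Int × Int)) : List (Int × Int) :=
  (PySem.List.enumerate nodes).flatMap (fun ip =>
    (PySem.List.slice nodes (some (ip.1 + 1)) none).flatMap (fun s =>
      if ip.2 ≠ s then
        [(2 * ip.2.1 - s.1, 2 * ip.2.2 - s.2), (2 * s.1 - ip.2.1, 2 * s.2 - ip.2.2)]
      else []))

-- ===== PRECONDITION & SPEC =====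
def Spec_calc_antinodes_for_freq (nodes : List (Int × Int)) (out : List (Int × Int)) : Prop := out = calc_antinodes_for_freq_alt nodes
instance (nodes : List (Int × Int)) (out : List (Int × Int)) : Decidable (Spec_calc_antinodes_for_freq nodes out) := by unfold Spec_calc_antinodes_for_freq; infer_instance

-- ===== CLAIM (what is proved, stated in full; the proofs are below) =====
def Claim_equal_calc_antinodes_for_freq : Prop := ∀ (nodes : List (Int × Int)), Dom_calc_antinodes_for_freq nodes → Spec_calc_antinodes_for_freq nodes (calc_antinodes_for_freq nodes)

-- ===== LEMMAS AND PROOFS =====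

-- the per-pair contribution both programs produce
def rowElems (p s : Int × Int) : List (Int × Int) :=
  if p ≠ s then [(2 * p.1 - s.1, 2 * p.2 - s.2), (2 * s.1 - p.1, 2 * s.2 - p.2)] else []

-- structural common form: both ports equal this
def tailsPairs : List (Int × Int) → List (Int × Int)
  | [] => []
  | p :: rest => rest.flatMap (rowElems p) ++ tailsPairs rest

theorem pairBody_eq (p s : Int × Int) (acc : List (Int × Int)) :
    ([(p.1 + (s.1 - p.1), p.2 + (s.2 - p.2)),
      (p.1 - (s.1 - p.1), p.2 - (s.2 - p.2)),
      (s.1 + (s.1 - p.1), s.2 + (s.2 - p.2)),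
      (s.1 - (s.1 - p.1), s.2 - (s.2 - p.2))] : List (Int × Int)).foldl
      (fun a anti => if check_within_square anti p s then a else a ++ [anti]) acc
    = acc ++ rowElems p s := by
  obtain ⟨px, py⟩ := p; obtain ⟨sx, sy⟩ := s
  simp only [List.foldl]
  by_cases h : (px, py) = ((sx, sy) : Int × Int)
  · obtain ⟨h1, h2⟩ := Prod.mk.injEq .. ▸ h
    subst h1; subst h2; simp [check_within_square, rowElems]
  · have hne : ¬ (px = sx ∧ py = sy) := by
      intro ⟨a, b⟩; exact h (by simp [a, b])
    have c1 : check_within_square (px + (sx - px), py + (sy - py)) (px, py) (sx, sy) = true := by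
      simp only [check_within_square]; split_ifs with h' <;> simp_all
    have c2 : check_within_square (px - (sx - px), py - (sy - py)) (px, py) (sx, sy) = false := by
      simp only [check_within_square]; split_ifs with h'
      · simp_all; omega
      · rfl
    have c3 : check_within_square (sx + (sx - px), sy + (sy - py)) (px, py) (sx, sy) = false := by
      simp only [check_within_square]; split_ifs with h'
      · simp_all; omega
      · rfl
    have c4 : check_within_square (sx - (sx - px), sy - (sy - py)) (px, py) (sx, sy) = true := by
      simp only [check_within_square]; split_ifs with h' <;> simp_all
    rw [c1, c2, c3, c4]
    simp [rowElems, h]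
    omega

theorem inner_eq (nodes : List (Int × Int)) (p : Int × Int) (k : Nat) (acc : List (Int × Int)) :
    (PySem.List.pyRange (k : Int) (nodes.length : Int) 1).foldl (fun acc2 j =>
        match PySem.List.pyGet? nodes j with
        | none => acc2
        | some secondary =>
          let slope_x := secondary.1 - p.1
          let slope_y := secondary.2 - p.2
          let potential_antis : List (Int × Int) :=
            [(p.1 + slope_x, p.2 + slope_y),
             (p.1 - slope_x, p.2 - slope_y),
             (secondary.1 + slope_x, secondary.2 + slope_y),
             (secondary.1 - slope_x, secondary.2 - slope_y)]
          potential_antis.foldl (fun a anti =>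
            if check_within_square anti p secondary then a else a ++ [anti]) acc2)
      acc
    = acc ++ (nodes.drop k).flatMap (rowElems p) := by
  by_cases hk : k < nodes.length
  · rw [PySem.List.pyRange_one_cons (by exact_mod_cast hk)]
    have hcast : ((k : Int) + 1) = ((k + 1 : Nat) : Int) := by push_cast; ring
    rw [List.foldl_cons, hcast, inner_eq nodes p (k + 1)]
    rw [PySem.List.pyGet?_natCast]
    rw [List.getElem?_eq_getElem hk]
    simp only []
    rw [pairBody_eq]
    conv_rhs => rw [List.drop_eq_getElem_cons hk, List.flatMap_cons]
    simp
  · rw [PySem.List.pyRange_one_eq_nil (by omega)]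
    rw [List.drop_eq_nil_of_le (by omega)]
    simp
termination_by nodes.length - k

theorem outer_eq (nodes : List (Int × Int)) (k : Nat) (acc : List (Int × Int)) :
    (PySem.List.pyRange (k : Int) (nodes.length : Int) 1).foldl (fun acc i =>
      match PySem.List.pyGet? nodes i with
      | none => acc
      | some primary =>
        (PySem.List.pyRange (i + 1) (nodes.length : Int) 1).foldl (fun acc2 j =>
          match PySem.List.pyGet? nodes j with
          | none => acc2
          | some secondary =>
            let slope_x := secondary.1 - primary.1
            let slope_y := secondary.2 - primary.2
            let potential_antis : List (Int × Int) :=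
              [(primary.1 + slope_x, primary.2 + slope_y),
               (primary.1 - slope_x, primary.2 - slope_y),
               (secondary.1 + slope_x, secondary.2 + slope_y),
               (secondary.1 - slope_x, secondary.2 - slope_y)]
            potential_antis.foldl (fun a anti =>
              if check_within_square anti primary secondary then a else a ++ [anti]) acc2)
          acc)
      acc
    = acc ++ tailsPairs (nodes.drop k) := by
  by_cases hk : k < nodes.length
  · rw [PySem.List.pyRange_one_cons (by exact_mod_cast hk)]
    have hcast : ((k : Int) + 1) = ((k + 1 : Nat) : Int) := by push_cast; ring
    rw [List.foldl_cons]
    rw [PySem.List.pyGet?_natCast, List.getElem?_eq_getElem hk]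
    simp only []
    rw [hcast, inner_eq, outer_eq nodes (k + 1)]
    rw [List.drop_eq_getElem_cons hk]
    simp [tailsPairs]
  · rw [PySem.List.pyRange_one_eq_nil (by omega)]
    rw [List.drop_eq_nil_of_le (by omega)]
    simp [tailsPairs]
termination_by nodes.length - k

theorem portA_eq (nodes : List (Int × Int)) :
    calc_antinodes_for_freq nodes = tailsPairs nodes := by
  have := outer_eq nodes 0 []
  simpa [calc_antinodes_for_freq] using this

theorem portB_go (nodes rest : List (Int × Int)) (k : Nat) (hk : nodes.drop k = rest) :
    (PySem.List.enumerate rest (k : Int)).flatMap (fun ip =>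
      (PySem.List.slice nodes (some (ip.1 + 1)) none).flatMap (fun s =>
        if ip.2 ≠ s then
          [(2 * ip.2.1 - s.1, 2 * ip.2.2 - s.2), (2 * s.1 - ip.2.1, 2 * s.2 - ip.2.2)]
        else []))
    = tailsPairs rest := by
  induction rest generalizing k with
  | nil => simp [PySem.List.enumerate, tailsPairs]
  | cons p rs ih =>
    have hklt : k < nodes.length := by
      by_contra h
      rw [List.drop_eq_nil_of_le (by omega)] at hk
      exact (List.cons_ne_nil _ _) hk.symm
    have hdrop : List.drop (k + 1) nodes = rs := by
      rw [← List.tail_drop, hk]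
      rfl
    have hcast : ((k : Int) + 1) = ((k + 1 : Nat) : Int) := by push_cast; ring
    have hslice : PySem.List.slice nodes (some ((k + 1 : Nat) : Int)) none = rs := by
      rw [PySem.List.slice_from_natCast, hdrop]
    rw [PySem.List.enumerate_cons, List.flatMap_cons, hcast, ih (k + 1) hdrop, hslice,
      tailsPairs]
    congr 1

theorem portB_eq (nodes : List (Int × Int)) :
    calc_antinodes_for_freq_alt nodes = tailsPairs nodes := by
  have := portB_go nodes nodes 0 (by simp)
  simpa [calc_antinodes_for_freq_alt, PySem.List.enumerate] using this

-- ===== VERDICT (by name: the statement is the Claim_ definition above) =====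
theorem calc_antinodes_for_freq_spec : Claim_equal_calc_antinodes_for_freq := by
  intro nodes _
  unfold Spec_calc_antinodes_for_freq
  rw [portA_eq, portB_eq]
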